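-- pv_equiv track=rewrite | github.com/kat-lon/AdventOfCode_2024 | Day_2_Red_Nosed_Reports/part_2.py | analize_report
-- ===== SOURCE A (Python) =====
-- def analize_report(report:list):
--     report_analysis = {'steep_pairs':set(),
--                        'repeating_pairs':set(),
--                        'increasing_pairs':set(),
--                        'decreasing_pairs':set()}
--
--     for i, j in zip(range(len(report) - 1), range(1, len(report))):
--
--         if abs(report[i] - report[j]) > 3:
--             report_analysis['steep_pairs'].add(i)
--             report_analysis['steep_pairs'].add(j)
--
--         if report[i] == report[j]:
--             report_analysis['repeating_pairs'].add(i)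
--             report_analysis['repeating_pairs'].add(j)
--
--         if report[i] < report[j]:
--             report_analysis['increasing_pairs'].add(i)
--             report_analysis['increasing_pairs'].add(j)
--         else:
--             report_analysis['decreasing_pairs'].add(i)
--             report_analysis['decreasing_pairs'].add(j)
--
--     return report_analysis
-- ===== SOURCE B (Python) =====
-- def analize_report(report: list):
--     n = len(report)
--
--     def near(k, pred):
--         # index k belongs to a category iff its pair with the left or right neighbour qualifies
--         return (k > 0 and pred(report[k - 1], report[k])) or \
--                (k < n - 1 and pred(report[k], report[k + 1]))
--
--     return {
--         'steep_pairs': {k for k in range(n) if near(k, lambda a, b: abs(a - b) > 3)},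
--         'repeating_pairs': {k for k in range(n) if near(k, lambda a, b: a == b)},
--         'increasing_pairs': {k for k in range(n) if near(k, lambda a, b: a < b)},
--         'decreasing_pairs': {k for k in range(n) if near(k, lambda a, b: a >= b)},
--     }
-- ===== Notes on version B (the rewrite author's own statement) =====
-- stated objective: alternative
-- what changed: Instead of A's single pass over adjacent pairs that inserts both endpoints into four mutated sets, B characterises membership per index: for each index k it tests whether k's pair with its left or right neighbour qualifies, so each category is a direct filter of the index range and no set-insertion/dedup ever happens.
import Mathlib
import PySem

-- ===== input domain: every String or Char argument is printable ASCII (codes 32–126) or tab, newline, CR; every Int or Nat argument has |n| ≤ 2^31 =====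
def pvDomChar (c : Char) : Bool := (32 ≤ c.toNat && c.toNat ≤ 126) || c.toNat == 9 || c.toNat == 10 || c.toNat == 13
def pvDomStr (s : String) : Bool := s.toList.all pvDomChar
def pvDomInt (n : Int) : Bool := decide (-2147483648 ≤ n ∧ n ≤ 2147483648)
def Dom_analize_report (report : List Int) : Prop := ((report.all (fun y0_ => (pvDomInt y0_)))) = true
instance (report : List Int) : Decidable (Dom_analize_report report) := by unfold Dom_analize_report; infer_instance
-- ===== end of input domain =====

-- B replaces A's pair-driven loop (insert both endpoints of each qualifying adjacent pair into four mutated sets)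
-- by a per-index membership test: each category is a filter of the index range by "my pair with a neighbour qualifies"
-- (objective: alternative decomposition, no set insertion/dedup).

-- ===== PORT A =====
def pvStepA (report : List Int) (acc : PySem.Set Int × PySem.Set Int × PySem.Set Int × PySem.Set Int)
    (ij : Int × Int) : PySem.Set Int × PySem.Set Int × PySem.Set Int × PySem.Set Int :=
  let ri := PySem.List.pyGetD report ij.1 0
  let rj := PySem.List.pyGetD report ij.2 0
  let s := if (3 : Int) < |ri - rj| then PySem.Set.add (PySem.Set.add acc.1 ij.1) ij.2 else acc.1
  let r := if ri = rj then PySem.Set.add (PySem.Set.add acc.2.1 ij.1) ij.2 else acc.2.1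
  let inc := if ri < rj then PySem.Set.add (PySem.Set.add acc.2.2.1 ij.1) ij.2 else acc.2.2.1
  let dec := if ri < rj then acc.2.2.2 else PySem.Set.add (PySem.Set.add acc.2.2.2 ij.1) ij.2
  (s, r, inc, dec)

def analize_report (report : List Int) : List (String × List Int) :=
  let n : Int := report.length
  let pairs := List.zip (PySem.List.pyRange 0 (n - 1) 1) (PySem.List.pyRange 1 n 1)
  let st := pairs.foldl (pvStepA report) (PySem.Set.empty, PySem.Set.empty, PySem.Set.empty, PySem.Set.empty)
  [("steep_pairs", st.1), ("repeating_pairs", st.2.1),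
   ("increasing_pairs", st.2.2.1), ("decreasing_pairs", st.2.2.2)]

-- ===== PORT B =====
-- B's 'near(k, pred)': index k belongs to a category iff its pair with the left or right neighbour qualifies.
-- (a pyGetD under a false '&&' guard is never the value of the expression, matching Python's short-circuit)
def pvNearB (report : List Int) (n : Int) (pred : Int → Int → Bool) (k : Int) : Bool :=
  (decide ((0:Int) < k) && pred (PySem.List.pyGetD report (k-1) 0) (PySem.List.pyGetD report k 0)) ||
  (decide (k < n - 1) && pred (PySem.List.pyGetD report k 0) (PySem.List.pyGetD report (k+1) 0))

def analize_report_alt (report : List Int) : List (String × List Int) :=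
  let n : Int := report.length
  let idx := PySem.List.pyRange 0 n 1
  [("steep_pairs", PySem.Set.ofList (idx.filter (pvNearB report n (fun a b => decide ((3:Int) < |a - b|))))),
   ("repeating_pairs", PySem.Set.ofList (idx.filter (pvNearB report n (fun a b => a == b)))),
   ("increasing_pairs", PySem.Set.ofList (idx.filter (pvNearB report n (fun a b => decide (a < b))))),
   ("decreasing_pairs", PySem.Set.ofList (idx.filter (pvNearB report n (fun a b => decide (b ≤ a)))))]

-- ===== PRECONDITION & SPEC =====
def Spec_analize_report (report : List Int) (out : List (String × List Int)) : Prop := out = analize_report_alt report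
instance (report : List Int) (out : List (String × List Int)) : Decidable (Spec_analize_report report out) := by unfold Spec_analize_report; infer_instance

-- ===== CLAIM (what is proved, stated in full; the proofs are below) =====
def Claim_equal_analize_report : Prop := ∀ (report : List Int), Dom_analize_report report → Spec_analize_report report (analize_report report)

-- ===== LEMMAS AND PROOFS =====

-- the pair list A zips up is the range of pair starts, paired with their successors
lemma pv_zip_eq (n : Int) :
    List.zip (PySem.List.pyRange 0 (n - 1) 1) (PySem.List.pyRange 1 n 1)
      = (PySem.List.pyRange 0 (n - 1) 1).map (fun i => (i, i + 1)) := by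
  have h1 := PySem.List.pyRange_one 0 (n - 1)
  have h2 := PySem.List.pyRange_one 1 n
  have hn : (n - 1 - 0).toNat = (n - 1).toNat := by omega
  rw [h1, h2, hn]
  rw [List.zip_map']
  simp
  intro a _
  omega

-- A's loop with four set accumulators computes the four categories independently
lemma pv_loop_eq (report : List Int) (L : List (Int × Int)) (s r inc dec : PySem.Set Int) :
    L.foldl (pvStepA report) (s, r, inc, dec) =
      (PySem.Set.update s ((L.filter (fun p =>
          decide ((3:Int) < |PySem.List.pyGetD report p.1 0 - PySem.List.pyGetD report p.2 0|))).flatMap (fun p => [p.1, p.2])),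
       PySem.Set.update r ((L.filter (fun p =>
          PySem.List.pyGetD report p.1 0 == PySem.List.pyGetD report p.2 0)).flatMap (fun p => [p.1, p.2])),
       PySem.Set.update inc ((L.filter (fun p =>
          decide (PySem.List.pyGetD report p.1 0 < PySem.List.pyGetD report p.2 0))).flatMap (fun p => [p.1, p.2])),
       PySem.Set.update dec ((L.filter (fun p =>
          decide (PySem.List.pyGetD report p.2 0 ≤ PySem.List.pyGetD report p.1 0))).flatMap (fun p => [p.1, p.2]))) := by
  induction L generalizing s r inc dec with
  | nil => simp [PySem.Set.update]
  | cons p L ih =>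
    simp only [List.foldl_cons, List.filter_cons]
    rw [ih]
    unfold pvStepA
    generalize PySem.List.pyGetD report p.1 0 = ri
    generalize PySem.List.pyGetD report p.2 0 = rj
    by_cases h3 : ri < rj
    · by_cases h1 : (3:Int) < |ri - rj| <;> by_cases h2 : ri = rj <;>
        simp [h1, h2, h3, not_le.mpr h3, PySem.Set.update]
    · by_cases h1 : (3:Int) < |ri - rj| <;> by_cases h2 : ri = rj <;>
        simp [h1, h2, h3, not_lt.mp h3, PySem.Set.update]

-- B's per-index predicate, specialised to a pair predicate c (c i = "pair (i,i+1) qualifies"); M = index of the last element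
def pvPred (c : Int → Bool) (M : Int) (k : Int) : Bool :=
  (decide ((0:Int) < k) && c (k - 1)) || (decide (k < M) && c k)

lemma pv_mem_cast_range {r : Nat} {x : Int} (hx : x ∈ (List.range r).map (fun j : Nat => (j : Int))) :
    0 ≤ x ∧ x < (r : Int) := by
  obtain ⟨j, hj, rfl⟩ := List.mem_map.mp hx
  have := List.mem_range.mp hj
  omega

lemma pv_not_mem_filter {r : Nat} {x : Int} (p : Int → Bool) (hx : (r : Int) ≤ x) :
    x ∉ ((List.range r).map (fun j : Nat => (j : Int))).filter p := by
  intro hmem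
  have := pv_mem_cast_range (List.mem_filter.mp hmem).1
  omega

-- KEY: deduplicated endpoints of the qualifying pairs (A's sets) = indices whose left or right pair qualifies (B)
lemma pv_key (c : Int → Bool) (m : Nat) :
    PySem.Set.ofList ((((List.range m).map (fun j : Nat => (j : Int))).filter c).flatMap (fun i => [i, i + 1]))
      = ((List.range (m + 1)).map (fun j : Nat => (j : Int))).filter (pvPred c (m : Int)) := by
  induction m with
  | zero =>
    simp [pvPred, PySem.Set.ofList]
  | succ m ih =>
    have hcast : (((m + 1 : Nat)) : Int) = (m : Int) + 1 := by push_cast; ring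
    rw [hcast]
    have hsub : ∀ x ∈ (List.range m).map (fun j : Nat => (j : Int)),
        pvPred c ((m : Int) + 1) x = pvPred c (m : Int) x := by
      intro x hx
      have hb := pv_mem_cast_range hx
      unfold pvPred
      rw [decide_eq_true (show x < (m : Int) + 1 by omega), decide_eq_true (show x < (m : Int) by omega)]
    have hG : ((List.range (m + 1)).map (fun j : Nat => (j : Int))).filter (pvPred c ((m : Int) + 1))
        = ((List.range m).map (fun j : Nat => (j : Int))).filter (pvPred c (m : Int))
          ++ (if pvPred c ((m : Int) + 1) (m : Int) then [(m : Int)] else []) := by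
      rw [List.range_succ, List.map_append, List.filter_append, List.filter_congr hsub]
      simp only [List.map_cons, List.map_nil, List.filter_cons, List.filter_nil]
    have hFm : ((List.range (m + 1)).map (fun j : Nat => (j : Int))).filter (pvPred c (m : Int))
        = ((List.range m).map (fun j : Nat => (j : Int))).filter (pvPred c (m : Int))
          ++ (if pvPred c (m : Int) (m : Int) then [(m : Int)] else []) := by
      rw [List.range_succ, List.map_append, List.filter_append]
      simp only [List.map_cons, List.map_nil, List.filter_cons, List.filter_nil]
    have hRHS : ((List.range (m + 1 + 1)).map (fun j : Nat => (j : Int))).filter (pvPred c ((m : Int) + 1))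
        = ((List.range (m + 1)).map (fun j : Nat => (j : Int))).filter (pvPred c ((m : Int) + 1))
          ++ (if c (m : Int) then [(m : Int) + 1] else []) := by
      rw [List.range_succ (n := m + 1), List.map_append, List.filter_append]
      have e0 : pvPred c ((m : Int) + 1) ((m : Int) + 1) = c (m : Int) := by
        unfold pvPred
        rw [decide_eq_true (show (0:Int) < (m : Int) + 1 by omega),
          decide_eq_false (show ¬ ((m : Int) + 1 < (m : Int) + 1) by omega),
          show (m : Int) + 1 - 1 = (m : Int) from by ring]
        simp
      simp only [List.map_cons, List.map_nil, List.filter_cons, List.filter_nil, hcast, e0]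
    rw [List.range_succ, List.map_append, List.filter_append, List.flatMap_append,
      PySem.Set.ofList_append, ih, hRHS, hG]
    simp only [List.map_cons, List.map_nil, List.filter_cons, List.filter_nil]
    by_cases hc : c (m : Int) = true
    · -- pair m qualifies: A inserts m and m+1 at the end; B's last two indices pass their filters
      have hpmT : pvPred c ((m : Int) + 1) (m : Int) = true := by
        unfold pvPred
        rw [decide_eq_true (show (m : Int) < (m : Int) + 1 by omega), hc]
        simp
      simp only [hc, if_true, hpmT, List.flatMap_cons, List.flatMap_nil, List.append_nil]
      rw [PySem.Set.update_cons, PySem.Set.update_cons, PySem.Set.update_nil, hFm]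
      have hnot1 : ((m : Int) + 1) ∉
          ((List.range m).map (fun j : Nat => (j : Int))).filter (pvPred c (m : Int)) ++ [(m : Int)] := by
        intro hmem
        rcases List.mem_append.mp hmem with hmm | hmm
        · exact pv_not_mem_filter _ (by omega) hmm
        · simp at hmm
      have hm_nin : ((m : Nat) : Int) ∉
          ((List.range m).map (fun j : Nat => (j : Int))).filter (pvPred c (m : Int)) :=
        pv_not_mem_filter _ (by omega)
      by_cases hb : pvPred c (m : Int) (m : Int) = true
      · have hin : ((m : Nat) : Int) ∈
            ((List.range m).map (fun j : Nat => (j : Int))).filter (pvPred c (m : Int)) ++ [(m : Int)] := by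
          simp
        rw [if_pos hb, PySem.Set.add_of_mem hin, PySem.Set.add_of_not_mem hnot1]
      · rw [if_neg hb, List.append_nil, PySem.Set.add_of_not_mem hm_nin,
          PySem.Set.add_of_not_mem hnot1]
    · -- pair m does not qualify: nothing new on either side
      have hc' : c (m : Int) = false := by simpa using hc
      have hpm : pvPred c ((m : Int) + 1) (m : Int) = pvPred c (m : Int) (m : Int) := by
        unfold pvPred
        rw [decide_eq_true (show (m : Int) < (m : Int) + 1 by omega),
          decide_eq_false (show ¬ ((m : Int) < (m : Int)) by omega), hc']
        simp
      simp only [hc', Bool.false_eq_true, if_false, List.flatMap_nil, List.append_nil, hpm]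
      rw [PySem.Set.update_nil]
      exact hFm

-- one category: A's update-empty-with-endpoints = B's ofList-of-filtered-index-range
lemma pv_cat (report : List Int) (m : Nat) (h : report.length = m + 1) (cond : Int → Int → Bool) :
    PySem.Set.update PySem.Set.empty
        ((((PySem.List.pyRange 0 ((report.length : Int) - 1) 1).map (fun i => (i, i + 1))).filter
            (fun p => cond (PySem.List.pyGetD report p.1 0) (PySem.List.pyGetD report p.2 0))).flatMap
          (fun p => [p.1, p.2]))
      = PySem.Set.ofList ((PySem.List.pyRange 0 (report.length : Int) 1).filter
          (pvNearB report (report.length : Int) cond)) := by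
  have hn : (report.length : Int) = (m : Int) + 1 := by rw [h]; push_cast; ring
  rw [hn]
  have hr1 : PySem.List.pyRange 0 ((m : Int) + 1 - 1) 1 = (List.range m).map (fun j : Nat => (j : Int)) := by
    rw [PySem.List.pyRange_one]
    have : ((m : Int) + 1 - 1 - 0).toNat = m := by omega
    rw [this]; simp
  have hr2 : PySem.List.pyRange 0 ((m : Int) + 1) 1 = (List.range (m + 1)).map (fun j : Nat => (j : Int)) := by
    rw [PySem.List.pyRange_one]
    have : ((m : Int) + 1 - 0).toNat = m + 1 := by omega
    rw [this]
    refine List.map_congr_left ?_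
    intro j _; omega
  rw [hr1, hr2]
  set c : Int → Bool := fun i => cond (PySem.List.pyGetD report i 0) (PySem.List.pyGetD report (i + 1) 0) with hcdef
  have hnear : pvNearB report ((m : Int) + 1) cond = pvPred c (m : Int) := by
    funext k
    simp only [pvNearB, pvPred, hcdef]
    rw [show (m : Int) + 1 - 1 = (m : Int) from by ring, show k - 1 + 1 = k from by ring]
  rw [hnear]
  have hupd : PySem.Set.update (PySem.Set.empty : PySem.Set Int) = PySem.Set.ofList := rfl
  rw [hupd]
  have hnd : (((List.range (m + 1)).map (fun j : Nat => (j : Int))).filter (pvPred c (m : Int))).Nodup :=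
    List.Nodup.filter _ (List.Nodup.map (fun a b hab => by exact_mod_cast hab) (List.nodup_range))
  rw [List.filter_map, List.flatMap_map]
  have hfil : ((fun p : Int × Int => cond (PySem.List.pyGetD report p.1 0) (PySem.List.pyGetD report p.2 0)) ∘ fun i : Int => (i, i + 1)) = c := rfl
  have hflat : (fun a : Int => [(a, a + 1).1, (a, a + 1).2]) = fun a : Int => [a, a + 1] := rfl
  rw [hfil, hflat, pv_key c m]
  exact (PySem.Set.ofList_eq_self_of_nodup _ hnd).symm

-- ===== VERDICT (by name: the statement is the Claim_ definition above) =====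
theorem analize_report_spec : Claim_equal_analize_report := by
  intro report _
  show analize_report report = analize_report_alt report
  cases report with
  | nil => rfl
  | cons a l =>
    have hlen : (a :: l).length = l.length + 1 := by simp
    unfold analize_report analize_report_alt
    dsimp only
    rw [pv_zip_eq, pv_loop_eq]
    have h1 := pv_cat (a :: l) l.length hlen (fun x y => decide ((3:Int) < |x - y|))
    have h2 := pv_cat (a :: l) l.length hlen (fun x y => x == y)
    have h3 := pv_cat (a :: l) l.length hlen (fun x y => decide (x < y))
    have h4 := pv_cat (a :: l) l.length hlen (fun x y => decide (y ≤ x))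
    beta_reduce at h1 h2 h3 h4
    rw [h1, h2, h3, h4]
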